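-- pv_equiv track=rewrite | github.com/FocusedLoop/203 | project_look.py | gameSchedule
-- ===== SOURCE A (Python) =====
-- def gameSchedule(assignedReferees):
--     schedule = []
--     games_to_schedule = list(assignedReferees.items())
--
--     while games_to_schedule:
--         slot = []
--         people_in_slot = set()
--
--         for game, ref in games_to_schedule[:]:
--             player1, player2 = game
--             if player1 not in people_in_slot and player2 not in people_in_slot and ref not in people_in_slot:
--                 slot.append((player1, player2, ref))
--                 people_in_slot.update(game)
--                 people_in_slot.add(ref)
--                 games_to_schedule.remove((game, ref))
--
--         schedule.append(set(slot))
--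
--     return schedule
-- ===== SOURCE B (Python) =====
-- def gameSchedule(assignedReferees):
--     # first-fit: one left-to-right pass, placing each game in the earliest conflict-free slot
--     slots = []  # list of (games list, people set) per time slot
--     for (player1, player2), ref in assignedReferees.items():
--         for games, people in slots:
--             if player1 not in people and player2 not in people and ref not in people:
--                 games.append((player1, player2, ref))
--                 people.update((player1, player2, ref))
--                 break
--         else:
--             slots.append(([(player1, player2, ref)], {player1, player2, ref}))
--     return [set(games) for games, _ in slots]
-- ===== Notes on version B (the rewrite author's own statement) =====
-- stated objective: faster
-- what changed: Replaces A's repeated full passes over the remaining games (with list.remove inside each pass) by a single left-to-right first-fit pass that places every game in the earliest conflict-free slot, keeping a people-set per slot.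
import Mathlib
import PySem

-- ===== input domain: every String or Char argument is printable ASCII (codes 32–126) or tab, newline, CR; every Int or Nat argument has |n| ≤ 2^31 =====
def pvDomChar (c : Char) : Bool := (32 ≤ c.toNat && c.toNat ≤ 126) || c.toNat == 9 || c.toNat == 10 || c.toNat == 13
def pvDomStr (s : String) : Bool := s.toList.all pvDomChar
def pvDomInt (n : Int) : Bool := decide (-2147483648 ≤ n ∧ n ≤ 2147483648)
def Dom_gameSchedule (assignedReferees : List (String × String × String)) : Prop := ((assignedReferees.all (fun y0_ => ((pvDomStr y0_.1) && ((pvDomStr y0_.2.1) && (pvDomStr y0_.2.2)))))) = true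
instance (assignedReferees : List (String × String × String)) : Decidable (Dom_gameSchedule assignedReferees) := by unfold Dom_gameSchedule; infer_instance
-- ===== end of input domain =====

-- B replaces A's repeated scan-and-remove passes by a single first-fit pass (earliest conflict-free slot per game): asymptotically faster.


-- ===== PORT A =====
-- The parameter is a Python dict[(str,str),str] passed as an association list:
-- rebuild the dict (insertion order, overwrite) before iterating its items (shared by both ports).
def pvToDict (l : List (String × String × String)) : PySem.Dict (String × String) String :=
  l.foldl (fun d y => d.insert (y.1, y.2.1) y.2.2) PySem.Dict.empty

-- 'player1 not in people_in_slot and player2 not in people_in_slot and ref not in people_in_slot'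
-- (the identical test appears in both Pythons)
def pvOk (people : PySem.Set String) (g : (String × String) × String) : Bool :=
  !(PySem.Set.contains people g.1.1) && !(PySem.Set.contains people g.1.2) && !(PySem.Set.contains people g.2)

-- the 'for game, ref in games_to_schedule[:]' body: state = (slot, people_in_slot, games_to_schedule).
-- list.remove: PySem.List.remove?; the .getD is only for totality — the removed element always comes
-- from the copy of games_to_schedule, so remove? never returns none here (Python never raises).
def pvPassA : List ((String × String) × String) → List (String × String × String) →
    PySem.Set String → List ((String × String) × String) →
    (List (String × String × String) × PySem.Set String × List ((String × String) × String))
  | [], slot, people, gts => (slot, people, gts)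
  | g :: rest, slot, people, gts =>
    if pvOk people g then
      pvPassA rest (slot ++ [(g.1.1, g.1.2, g.2)])
        (PySem.Set.add (PySem.Set.update people [g.1.1, g.1.2]) g.2)
        ((PySem.List.remove? gts g).getD gts)
    else pvPassA rest slot people gts

theorem pvPassA_len : ∀ (c : List ((String × String) × String)) slot people gts,
    (pvPassA c slot people gts).2.2.length ≤ gts.length := by
  intro c
  induction c with
  | nil => intro slot people gts; simp [pvPassA]
  | cons g rest ih =>
    intro slot people gts
    simp only [pvPassA]
    split
    · refine le_trans (ih _ _ _) ?_
      cases h : PySem.List.remove? gts g with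
      | none => simp
      | some l =>
        have hv : g ∈ gts := by
          by_contra hv
          rw [(PySem.List.remove?_eq_none_iff _ _).2 hv] at h
          simp at h
        rw [PySem.List.remove?_eq_some_erase gts g hv] at h
        injection h with h2
        subst h2
        simpa using List.length_erase_le
    · exact ih _ _ _

theorem pvPassA_lt (g : (String × String) × String) (rest : List ((String × String) × String)) :
    (pvPassA (g :: rest) [] PySem.Set.empty (g :: rest)).2.2.length < (g :: rest).length := by
  have hok : pvOk PySem.Set.empty g = true := by simp [pvOk, PySem.Set.contains, PySem.Set.empty]
  simp only [pvPassA, hok, if_pos, PySem.List.remove?_cons_self, Option.getD_some]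
  exact Nat.lt_succ_of_le (pvPassA_len _ _ _ _)

-- the 'while games_to_schedule:' loop; schedule.append(set(slot)).
def pvLoopA (games : List ((String × String) × String))
    (schedule : List (List (String × String × String))) : List (List (String × String × String)) :=
  match games with
  | [] => schedule
  | g :: rest =>
    let r := pvPassA (g :: rest) [] PySem.Set.empty (g :: rest)
    pvLoopA r.2.2 (schedule ++ [PySem.Set.ofList r.1])
termination_by games.length
decreasing_by exact pvPassA_lt g rest

def gameSchedule (assignedReferees : List (String × String × String)) :
    List (List (String × String × String)) :=
  pvLoopA (pvToDict assignedReferees).items []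

-- ===== PORT B =====
-- place one game in the earliest slot with no person clash (the inner 'for … else' of Source B)
def pvPlaceB (g : (String × String) × String) :
    List (List (String × String × String) × PySem.Set String) →
    List (List (String × String × String) × PySem.Set String)
  | [] => [([(g.1.1, g.1.2, g.2)], PySem.Set.ofList [g.1.1, g.1.2, g.2])]
  | (games, people) :: rest =>
    if pvOk people g then
      (games ++ [(g.1.1, g.1.2, g.2)], PySem.Set.update people [g.1.1, g.1.2, g.2]) :: rest
    else (games, people) :: pvPlaceB g rest

def gameSchedule_alt (assignedReferees : List (String × String × String)) :
    List (List (String × String × String)) :=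
  ((pvToDict assignedReferees).items.foldl (fun slots g => pvPlaceB g slots) []).map
    (fun x => PySem.Set.ofList x.1)

-- ===== PRECONDITION & SPEC =====
def Spec_gameSchedule (assignedReferees : List (String × String × String)) (out : List (List (String × String × String))) : Prop := out = gameSchedule_alt assignedReferees
instance (assignedReferees : List (String × String × String)) (out : List (List (String × String × String))) : Decidable (Spec_gameSchedule assignedReferees out) := by unfold Spec_gameSchedule; infer_instance

-- ===== CLAIM (what is proved, stated in full; the proofs are below) =====
def Claim_equal_gameSchedule : Prop := ∀ (assignedReferees : List (String × String × String)), Dom_gameSchedule assignedReferees → Spec_gameSchedule assignedReferees (gameSchedule assignedReferees)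

-- ===== LEMMAS AND PROOFS =====

-- one greedy pass in partition form: (picked slot, people, rejected games in order)
def pvOnePass : List ((String × String) × String) → List (String × String × String) →
    PySem.Set String →
    (List (String × String × String) × PySem.Set String × List ((String × String) × String))
  | [], slot, people => (slot, people, [])
  | g :: rest, slot, people =>
    if pvOk people g then
      pvOnePass rest (slot ++ [(g.1.1, g.1.2, g.2)])
        (PySem.Set.add (PySem.Set.update people [g.1.1, g.1.2]) g.2)
    else
      let r := pvOnePass rest slot people
      (r.1, r.2.1, g :: r.2.2)

theorem pvOnePass_rej_sublist : ∀ (c : List ((String × String) × String)) slot people,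
    (pvOnePass c slot people).2.2.Sublist c := by
  intro c
  induction c with
  | nil => intro slot people; simp [pvOnePass]
  | cons g rest ih =>
    intro slot people
    simp only [pvOnePass]
    split
    · exact (ih _ _).trans (List.sublist_cons_self _ _)
    · exact (ih slot people).cons₂ g

theorem pvRemove_append_notmem (g : (String × String) × String)
    (rej c : List ((String × String) × String)) (h : g ∉ rej) :
    PySem.List.remove? (rej ++ g :: c) g = some (rej ++ c) := by
  induction rej with
  | nil => simp
  | cons a t ih =>
    have hne : a ≠ g := fun e => h (e ▸ List.mem_cons_self)
    rw [List.cons_append, PySem.List.remove?_cons_of_ne _ hne,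
      ih (fun hm => h (List.mem_cons_of_mem a hm))]
    rfl

theorem pvPassA_eq_onePass : ∀ (c : List ((String × String) × String)) slot people rej,
    (rej ++ c).Nodup →
    pvPassA c slot people (rej ++ c) =
      ((pvOnePass c slot people).1, (pvOnePass c slot people).2.1,
        rej ++ (pvOnePass c slot people).2.2) := by
  intro c
  induction c with
  | nil => intro slot people rej _; simp [pvPassA, pvOnePass]
  | cons g rest ih =>
    intro slot people rej hnd
    rcases List.nodup_append.1 hnd with ⟨h1, h2, h3⟩
    have hgrej : g ∉ rej := fun hm => h3 g hm g List.mem_cons_self rfl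
    simp only [pvPassA, pvOnePass]
    split
    · rw [pvRemove_append_notmem g rej rest hgrej]
      simp only [Option.getD_some]
      exact ih _ _ rej
        (List.nodup_append.2 ⟨h1, (List.nodup_cons.1 h2).2,
          by intro a ha b hb; exact h3 a ha b (List.mem_cons_of_mem _ hb)⟩)
    · have h2 : (rej ++ [g]) ++ rest = rej ++ g :: rest := by simp
      have := ih slot people (rej ++ [g]) (by rw [h2]; exact hnd)
      rw [h2] at this
      rw [this]
      simp

theorem pvFF : ∀ (c : List ((String × String) × String)) slot people ss,
    List.foldl (fun slots g => pvPlaceB g slots) ((slot, people) :: ss) c =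
      ((pvOnePass c slot people).1, (pvOnePass c slot people).2.1) ::
        List.foldl (fun slots g => pvPlaceB g slots) ss (pvOnePass c slot people).2.2 := by
  intro c
  induction c with
  | nil => intro slot people ss; simp [pvOnePass]
  | cons g rest ih =>
    intro slot people ss
    simp only [List.foldl_cons, pvPlaceB, pvOnePass]
    split
    · have hupd : PySem.Set.update people [g.1.1, g.1.2, g.2] =
          PySem.Set.add (PySem.Set.update people [g.1.1, g.1.2]) g.2 := by
        simp [PySem.Set.update, List.foldl]
      rw [hupd]
      exact ih _ _ ss
    · rw [ih slot people (pvPlaceB g ss)]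
      simp

-- the common schedule: slots produced pass by pass
def pvSched (c : List ((String × String) × String)) : List (List (String × String × String)) :=
  match c with
  | [] => []
  | g :: rest =>
    (pvOnePass (g :: rest) [] PySem.Set.empty).1 ::
      pvSched (pvOnePass (g :: rest) [] PySem.Set.empty).2.2
termination_by c.length
decreasing_by
  have hok : pvOk PySem.Set.empty g = true := by simp [pvOk, PySem.Set.contains, PySem.Set.empty]
  simp only [pvOnePass, hok, if_pos]
  exact Nat.lt_succ_of_le ((pvOnePass_rej_sublist rest _ _).length_le)

theorem pvLoopA_eq : ∀ (n : Nat) (c : List ((String × String) × String)) sched,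
    c.length ≤ n → c.Nodup →
    pvLoopA c sched = sched ++ (pvSched c).map PySem.Set.ofList := by
  intro n
  induction n with
  | zero =>
    intro c sched hlen _
    have : c = [] := List.eq_nil_of_length_eq_zero (Nat.le_zero.1 hlen)
    subst this; simp [pvLoopA, pvSched]
  | succ n ih =>
    intro c sched hlen hnd
    match c with
    | [] => simp [pvLoopA, pvSched]
    | g :: rest =>
      rw [pvLoopA, pvSched]
      have hpass := pvPassA_eq_onePass (g :: rest) [] PySem.Set.empty [] (by simpa using hnd)
      simp only [List.nil_append] at hpass
      rw [hpass]
      have hsub := pvOnePass_rej_sublist (g :: rest) [] PySem.Set.empty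
      have hlt : (pvOnePass (g :: rest) [] PySem.Set.empty).2.2.length < (g :: rest).length := by
        have hok : pvOk PySem.Set.empty g = true := by
          simp [pvOk, PySem.Set.contains, PySem.Set.empty]
        simp only [pvOnePass, hok, if_pos]
        exact Nat.lt_succ_of_le ((pvOnePass_rej_sublist rest _ _).length_le)
      rw [ih _ _ (by omega) (hnd.sublist hsub)]
      simp

theorem pvFoldB_eq : ∀ (n : Nat) (c : List ((String × String) × String)),
    c.length ≤ n →
    (List.foldl (fun slots g => pvPlaceB g slots) [] c).map (fun x => PySem.Set.ofList x.1) =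
      (pvSched c).map PySem.Set.ofList := by
  intro n
  induction n with
  | zero =>
    intro c hlen
    have : c = [] := List.eq_nil_of_length_eq_zero (Nat.le_zero.1 hlen)
    subst this; simp [pvSched]
  | succ n ih =>
    intro c hlen
    match c with
    | [] => simp [pvSched]
    | g :: rest =>
      have hok : pvOk PySem.Set.empty g = true := by
        simp [pvOk, PySem.Set.contains, PySem.Set.empty]
      have hinit : pvPlaceB g ([] : List (List (String × String × String) × PySem.Set String)) =
          [([(g.1.1, g.1.2, g.2)],
            PySem.Set.add (PySem.Set.update PySem.Set.empty [g.1.1, g.1.2]) g.2)] := by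
        simp [pvPlaceB, PySem.Set.ofList, PySem.Set.update, List.foldl, PySem.Set.empty]
      rw [List.foldl_cons, hinit, pvFF, pvSched]
      simp only [pvOnePass, hok, if_pos, List.nil_append]
      have hlt : (pvOnePass rest [(g.1.1, g.1.2, g.2)]
          (PySem.Set.add (PySem.Set.update PySem.Set.empty [g.1.1, g.1.2]) g.2)).2.2.length
          ≤ rest.length := (pvOnePass_rej_sublist rest _ _).length_le
      have hr : rest.length ≤ n := by simpa using hlen
      rw [List.map_cons, ih _ (le_trans hlt hr)]
      simp

theorem pvItems_nodup (l : List (String × String × String)) : (pvToDict l).items.Nodup := by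
  have hkeys : (pvToDict l).keys.Nodup := by
    unfold pvToDict
    exact PySem.Dict.nodup_keys_foldl_insert_key l (fun y => (y.1, y.2.1)) _ _
      PySem.Dict.nodup_keys_empty
  exact List.Nodup.of_map _ hkeys

-- ===== VERDICT (by name: the statement is the Claim_ definition above) =====
theorem gameSchedule_spec : Claim_equal_gameSchedule := by
  intro l _
  unfold Spec_gameSchedule gameSchedule gameSchedule_alt
  rw [pvLoopA_eq (pvToDict l).items.length _ [] le_rfl (pvItems_nodup l),
    pvFoldB_eq (pvToDict l).items.length _ le_rfl]
  simp
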